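-- pv_equiv track=rewrite | github.com/blakelockley/lambda | lambda/parser.py | match_parans
-- ===== SOURCE A (Python) =====
-- def match_parans(text: str):
--     """
--     Return a list of expr_text at the top level of 'text'.
--     """
--
--     # TODO: Have this split top level expressions
--
--     if text[0] != "(":
--         return []
--
--     result = []
--     start = 0
--     counter = 0
--
--     for pos, char in enumerate(text):
--
--         if char == "(":
--             counter += 1
--
--         elif char == ")":
--             counter -= 1
--
--         if counter == 0:
--             expr_text = text[start + 1 : pos]
--             result.append(expr_text)
--
--             # Resest counter
--             counter = 0
--             start = pos + 1
--
--     return result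
-- ===== SOURCE B (Python) =====
-- def match_parans(text: str):
--     """
--     Return a list of expr_text at the top level of 'text'.
--     """
--     if text[0] != "(":
--         return []
--
--     # Pass 1: cumulative paren depth after each character.
--     depths = []
--     d = 0
--     for ch in text:
--         if ch == "(":
--             d += 1
--         elif ch == ")":
--             d -= 1
--         depths.append(d)
--
--     # Pass 2: positions where the running depth returns to zero.
--     zeros = [i for i, depth in enumerate(depths) if depth == 0]
--
--     # Pass 3: emit the slice between consecutive zero positions.
--     result = []
--     start = 0
--     for z in zeros:
--         result.append(text[start + 1 : z])
--         start = z + 1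
--     return result
-- ===== Notes on version B (the rewrite author's own statement) =====
-- stated objective: alternative
-- what changed: Replaces A's single stateful scan (running counter, emit-and-reset inside the loop) by three separate passes: build the list of cumulative paren depths, collect the positions where the depth is zero, then emit the slice between consecutive zero positions.
import Mathlib
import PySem

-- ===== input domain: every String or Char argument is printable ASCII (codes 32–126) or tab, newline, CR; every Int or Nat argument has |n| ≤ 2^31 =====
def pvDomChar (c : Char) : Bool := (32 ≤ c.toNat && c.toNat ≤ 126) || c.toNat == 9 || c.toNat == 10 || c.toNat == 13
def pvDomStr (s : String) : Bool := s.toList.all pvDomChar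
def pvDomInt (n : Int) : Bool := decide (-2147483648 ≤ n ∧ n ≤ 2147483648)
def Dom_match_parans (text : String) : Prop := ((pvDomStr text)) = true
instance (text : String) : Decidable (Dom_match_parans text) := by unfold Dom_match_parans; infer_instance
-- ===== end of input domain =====

-- B replaces A's single stateful emit-inside-the-loop scan by three passes (depth list,
-- zero positions, slice between consecutive zeros); same O(n) cost, different decomposition.

-- ===== PORT A =====
-- A's loop body: update counter on '('/')', and whenever it is 0 emit text[start+1:pos].
def pvStepA (text : String) (st : List String × Int × Int) (pc : Int × Char) : List String × Int × Int :=
  let counter : Int :=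
    if pc.2 = '(' then st.2.2 + 1
    else if pc.2 = ')' then st.2.2 - 1
    else st.2.2
  if counter = 0 then
    (st.1 ++ [PySem.Str.slice text (some (st.2.1 + 1)) (some pc.1)], pc.1 + 1, 0)
  else
    (st.1, st.2.1, counter)

def match_parans (text : String) : List String :=
  match PySem.Str.pyGet? text 0 with
  | none => []          -- first-character access raises IndexError in Python; excluded by Pre_
  | some c0 =>
    if c0 ≠ '(' then []
    else
      ((PySem.List.enumerate text.toList 0).foldl (pvStepA text) ([], 0, 0)).1

-- ===== PORT B =====
-- pass 1 of Source B: cumulative depth after each character (appending fold)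
def pvDepthStep (st : List Int × Int) (ch : Char) : List Int × Int :=
  let d : Int := if ch = '(' then st.2 + 1 else if ch = ')' then st.2 - 1 else st.2
  (st.1 ++ [d], d)

-- pass 3 of Source B: slice between consecutive zero positions
def pvEmitStep (text : String) (st : List String × Int) (z : Int) : List String × Int :=
  (st.1 ++ [PySem.Str.slice text (some (st.2 + 1)) (some z)], z + 1)

def match_parans_alt (text : String) : List String :=
  match PySem.Str.pyGet? text 0 with
  | none => []          -- first-character access raises IndexError in Python; excluded by Pre_
  | some c0 =>
    if c0 ≠ '(' then []
    else
      let depths := (text.toList.foldl pvDepthStep ([], 0)).1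
      let zeros := ((PySem.List.enumerate depths 0).filter (fun p => p.2 == 0)).map (·.1)
      (zeros.foldl (pvEmitStep text) ([], 0)).1

-- ===== PRECONDITION & SPEC =====
-- Pre_ excludes only the empty string, on which A's first-character access raises IndexError (B raises there too).
def Pre_match_parans (text : String) : Prop := text ≠ ""
instance (text : String) : Decidable (Pre_match_parans text) := by unfold Pre_match_parans; infer_instance
def pvWitness_match_parans : String := "(a)(b)"

def Spec_match_parans (text : String) (out : List String) : Prop := out = match_parans_alt text
instance (text : String) (out : List String) : Decidable (Spec_match_parans text out) := by unfold Spec_match_parans; infer_instance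

-- ===== CLAIM (what is proved, stated in full; the proofs are below) =====
def Claim_equal_match_parans : Prop := ∀ (text : String), Dom_match_parans text → Pre_match_parans text → Spec_match_parans text (match_parans text)

-- ===== LEMMAS AND PROOFS =====

-- recursive depth list (what Source B's pass 1 builds)
def pvDepthList (d : Int) : List Char → List Int
  | [] => []
  | c :: cs =>
    let d' : Int := if c = '(' then d + 1 else if c = ')' then d - 1 else d
    d' :: pvDepthList d' cs

theorem pvDepthFold (l : List Char) (acc : List Int) (d : Int) :
    (l.foldl pvDepthStep (acc, d)).1 = acc ++ pvDepthList d l := by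
  induction l generalizing acc d with
  | nil => simp [pvDepthList]
  | cons c cs ih =>
    simp only [List.foldl_cons, pvDepthStep, pvDepthList]
    rw [ih]
    simp

theorem pvMain (text : String) (l : List Char) (pos : Int) (res : List String) (start d : Int) :
    ((PySem.List.enumerate l pos).foldl (pvStepA text) (res, start, d)).1
      = ((((PySem.List.enumerate (pvDepthList d l) pos).filter (fun p => p.2 == 0)).map (·.1)).foldl
          (pvEmitStep text) (res, start)).1 := by
  induction l generalizing pos res start d with
  | nil => simp [pvDepthList, PySem.List.enumerate_nil]
  | cons c cs ih =>
    rw [pvDepthList, PySem.List.enumerate_cons, PySem.List.enumerate_cons]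
    by_cases hd : (if c = '(' then d + 1 else if c = ')' then d - 1 else d) = 0
    · simp only [List.foldl_cons, pvStepA, hd, List.filter_cons,
        beq_self_eq_true, if_true, List.map_cons, pvEmitStep]
      rw [ih]
    · simp only [List.foldl_cons, pvStepA, List.filter_cons, beq_iff_eq, hd,
        if_false]
      exact ih _ _ _ _

-- ===== VERDICT (by name: the statement is the Claim_ definition above) =====
theorem match_parans_spec : Claim_equal_match_parans := by
  intro text _ _
  unfold Spec_match_parans match_parans match_parans_alt
  cases h : PySem.Str.pyGet? text 0 with
  | none => rfl
  | some c0 =>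
    by_cases hc : c0 ≠ '('
    · simp [hc]
    · simp only [hc, if_false]
      rw [pvDepthFold text.toList [] 0]
      simp [pvMain text text.toList 0 [] 0 0]
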